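-- pv_equiv track=rewrite | github.com/zhongyulyu/smart_robot | calculate/calculating.py | split_exp
-- ===== SOURCE A (Python) =====
-- def split_exp(exp):
--     exp_lst = []
--     start = 0
--     for i,a in enumerate(exp):
--         if i == 0:
--             continue
--         elif a in '+-*/^√':
--             exp_lst.append(exp[start:i])
--             exp_lst.append(a)
--             start = i + 1
--     exp_lst.append(exp[start:])
--
--     return exp_lst
-- ===== SOURCE B (Python) =====
-- import re
--
-- _OP_SPLIT = re.compile(r'([+\-*/^√])')
--
-- def split_exp(exp):
--     if exp == '':
--         return ['']
--     parts = _OP_SPLIT.split(exp[1:])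
--     parts[0] = exp[0] + parts[0]
--     return parts
-- ===== Notes on version B (the rewrite author's own statement) =====
-- stated objective: idiomatic
-- what changed: A's explicit indexed scan with a start-pointer and slice bookkeeping is replaced by a single regex split on the operator character class (capturing group keeps the operators), with the first character prepended to the first field since A never splits at position 0.
import Mathlib
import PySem

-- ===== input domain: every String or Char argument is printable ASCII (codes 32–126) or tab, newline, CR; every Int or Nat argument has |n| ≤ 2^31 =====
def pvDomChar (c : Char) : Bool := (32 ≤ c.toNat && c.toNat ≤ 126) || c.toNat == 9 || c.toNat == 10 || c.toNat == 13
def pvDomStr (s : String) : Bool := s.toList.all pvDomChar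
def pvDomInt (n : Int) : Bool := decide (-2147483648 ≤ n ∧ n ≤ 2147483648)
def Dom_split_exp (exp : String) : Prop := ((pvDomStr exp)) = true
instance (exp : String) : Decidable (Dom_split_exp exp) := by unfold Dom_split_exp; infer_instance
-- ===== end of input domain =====

-- B replaces A's indexed scan with `start`-pointer bookkeeping by a regex split on the
-- operator class (ported as a structural one-pass splitter); objective: idiomatic.

-- the operator characters of the Python literal '+-*/^√'
def pvOps : List Char := ['+', '-', '*', '/', '^', '√']

-- ===== PORT A =====
-- the for-loop of A: state = (exp_lst, start), index i carried explicitly; slices via PySem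
def splitExpLoopA (cs : List Char) : List Char → Nat → Nat → List (List Char) →
    List (List Char) × Nat
  | [], _, start, acc => (acc, start)
  | a :: rest, i, start, acc =>
    if i = 0 then splitExpLoopA cs rest (i + 1) start acc
    else if a ∈ pvOps then
      splitExpLoopA cs rest (i + 1) (i + 1)
        (acc ++ [PySem.List.slice cs (some (start : Int)) (some (i : Int))] ++ [[a]])
    else splitExpLoopA cs rest (i + 1) start acc

def split_exp (exp : String) : List String :=
  let cs := exp.toList
  let r := splitExpLoopA cs cs 0 0 []
  (r.1 ++ [PySem.List.slice cs (some (r.2 : Int)) none]).map String.ofList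

-- ===== PORT B =====
-- re.split(r'([+\-*/^√])', s) for a single-character class, ported by hand (exact here:
-- each operator char is one match, the capturing group keeps it, fields may be empty)
def reSplitOps : List Char → List (List Char)
  | [] => [[]]
  | c :: cs =>
    if c ∈ pvOps then [] :: [c] :: reSplitOps cs
    else
      match reSplitOps cs with
      | [] => [[c]]   -- unreachable: reSplitOps never returns []
      | t :: ts => (c :: t) :: ts

def split_exp_alt (exp : String) : List String :=
  match exp.toList with
  | [] => [""]
  | c :: cs =>
    match reSplitOps cs with
    | [] => [String.ofList [c]]   -- unreachable
    | t :: ts => String.ofList (c :: t) :: ts.map String.ofList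

-- ===== PRECONDITION & SPEC =====
def Spec_split_exp (exp : String) (out : List String) : Prop := out = split_exp_alt exp
instance (exp : String) (out : List String) : Decidable (Spec_split_exp exp out) := by unfold Spec_split_exp; infer_instance

-- ===== CLAIM (what is proved, stated in full; the proofs are below) =====
def Claim_equal_split_exp : Prop := ∀ (exp : String), Dom_split_exp exp → Spec_split_exp exp (split_exp exp)

-- ===== LEMMAS AND PROOFS =====

theorem reSplitOps_ne_nil (cs : List Char) : reSplitOps cs ≠ [] := by
  cases cs with
  | nil => simp [reSplitOps]
  | cons c cs =>
    simp only [reSplitOps]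
    split
    · simp
    · cases h : reSplitOps cs <;> simp

-- prepend `p` to the first field of a split result
def glueHead (p : List Char) : List (List Char) → List (List Char)
  | [] => [p]
  | t :: ts => (p ++ t) :: ts

theorem splitExpLoopA_resplit (cs : List Char) :
    ∀ (ds : List Char) (i start : Nat) (acc : List (List Char)) (pending : List Char),
      1 ≤ i → start ≤ i → pending.length = i - start → cs.drop start = pending ++ ds →
      (splitExpLoopA cs ds i start acc).1 ++
        [PySem.List.slice cs (some (((splitExpLoopA cs ds i start acc).2 : Nat) : Int)) none] =
      acc ++ glueHead pending (reSplitOps ds) := by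
  intro ds
  induction ds with
  | nil =>
    intro i start acc pending hi hsi hlen hdrop
    simp only [splitExpLoopA, PySem.List.slice_from_natCast, hdrop, List.append_nil,
      reSplitOps, glueHead]
  | cons a rest ih =>
    intro i start acc pending hi hsi hlen hdrop
    have hine : ¬ (i = 0) := by omega
    obtain ⟨t, ts, hts⟩ : ∃ t ts, reSplitOps rest = t :: ts := by
      cases h : reSplitOps rest with
      | nil => exact absurd h (reSplitOps_ne_nil rest)
      | cons t ts => exact ⟨t, ts, rfl⟩
    by_cases hop : a ∈ pvOps
    · -- operator: flush the pending segment and the operator, restart after it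
      have hslice : PySem.List.slice cs (some (start : Int)) (some (i : Int)) = pending := by
        rw [PySem.List.slice_natCast, hdrop, ← hlen]
        exact List.take_left
      have hdrop' : cs.drop (i + 1) = [] ++ rest := by
        have h2 : cs.drop (i + 1) = (cs.drop start).drop (i + 1 - start) := by
          rw [List.drop_drop]; congr 1; omega
        rw [h2, hdrop, show i + 1 - start = pending.length + 1 from by omega,
          show pending ++ a :: rest = (pending ++ [a]) ++ rest from by simp,
          show pending.length + 1 = (pending ++ [a]).length from by simp]
        exact List.drop_left
      have hrec := ih (i + 1) (i + 1)
        (acc ++ [PySem.List.slice cs (some (start : Int)) (some (i : Int))] ++ [[a]]) []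
        (by omega) (by omega) (by simp) hdrop'
      simp only [splitExpLoopA, hine, if_false, hop, if_true]
      rw [hrec, hslice]
      simp [reSplitOps, hop, hts, glueHead]
    · -- ordinary character: it joins the pending segment
      have hdrop' : cs.drop start = (pending ++ [a]) ++ rest := by
        rw [hdrop]; simp
      have hrec := ih (i + 1) start acc (pending ++ [a]) (by omega) (by omega)
        (by simp only [List.length_append, List.length_cons, List.length_nil]; omega) hdrop'
      simp only [splitExpLoopA, hine, if_false, hop, if_false]
      rw [hrec]
      simp [reSplitOps, hop, hts, glueHead]

-- ===== VERDICT (by name: the statement is the Claim_ definition above) =====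
theorem split_exp_spec : Claim_equal_split_exp := by
  intro exp _
  unfold Spec_split_exp split_exp split_exp_alt
  cases hcs : exp.toList with
  | nil => decide
  | cons c rest =>
    obtain ⟨t, ts, hts⟩ : ∃ t ts, reSplitOps rest = t :: ts := by
      cases h : reSplitOps rest with
      | nil => exact absurd h (reSplitOps_ne_nil rest)
      | cons t ts => exact ⟨t, ts, rfl⟩
    have h0 : splitExpLoopA (c :: rest) (c :: rest) 0 0 [] =
        splitExpLoopA (c :: rest) rest 1 0 [] := by
      simp [splitExpLoopA]
    have key := splitExpLoopA_resplit (c :: rest) rest 1 0 [] [c]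
      (by omega) (by omega) (by simp) (by simp)
    rw [hts] at key
    simp only [glueHead, List.nil_append, List.singleton_append] at key
    simp only [hts]
    rw [h0, key]
    simp
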